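-- pv_equiv track=rewrite | github.com/Faccio7L/ayed1-2025-tps | TP3/ejercicio.2.py | patron_e
-- ===== SOURCE A (Python) =====
-- def patron_e(matriz:list)->list[list]:
--     """
--     Carga una matriz en un patron especificado.
--     pre: No recibe parametros
--     post: Retorna la matriz
--     """
--
--     valor_inicial = 1
--     for i,fila in enumerate(matriz):
--         for i2,e in enumerate(fila):
--             if i % 2 == 0: #para filas pares, appendeo en ELEMENTOS impares
--                 if i2 % 2 == 1:
--                     matriz[i][i2] = valor_inicial
--                     valor_inicial += 1
--             else: #exactamente lo contrario!
--                 if i2 % 2 == 0: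
--                     matriz[i][i2] = valor_inicial
--                     valor_inicial += 1
--     return matriz
-- ===== SOURCE B (Python) =====
-- def patron_e(matriz: list) -> list[list]:
--     # Closed-form fill: no running counter; each active cell's value is a
--     # prefix sum over previous rows plus its in-row active rank.
--     prefix = 0
--     for i, fila in enumerate(matriz):
--         for i2 in range(len(fila)):
--             if (i + i2) % 2 == 1:
--                 matriz[i][i2] = prefix + (i2 + i % 2) // 2 + 1
--         prefix += (len(fila) + i % 2) // 2
--     return matriz
-- ===== Notes on version B (the rewrite author's own statement) =====
-- stated objective: alternative
-- what changed: The running counter threaded through both loops is replaced by a closed-form value per cell: a prefix sum of active cells of previous rows plus the cell's in-row active rank, so each cell is computed independently.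
import Mathlib
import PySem

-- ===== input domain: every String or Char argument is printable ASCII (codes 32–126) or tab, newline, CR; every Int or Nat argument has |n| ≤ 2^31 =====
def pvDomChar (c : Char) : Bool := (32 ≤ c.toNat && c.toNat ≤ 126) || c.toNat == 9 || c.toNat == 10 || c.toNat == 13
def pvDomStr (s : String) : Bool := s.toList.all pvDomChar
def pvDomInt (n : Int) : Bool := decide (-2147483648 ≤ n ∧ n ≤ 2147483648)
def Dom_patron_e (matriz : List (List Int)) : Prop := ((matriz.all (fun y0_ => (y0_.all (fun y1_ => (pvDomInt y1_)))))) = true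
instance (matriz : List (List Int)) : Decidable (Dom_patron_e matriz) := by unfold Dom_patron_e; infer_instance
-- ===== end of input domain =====

-- B mutates the argument in place exactly as A does; the equivalence proved here is about the returned matrix.
-- B replaces A's running counter by a closed-form value per cell (prefix sum + in-row rank): objective 'alternative'.

-- ===== PORT A =====
-- inner loop of A: walks one row at index i2 with counter v, writing v into qualifying cells
def patronARow (i : Nat) : Nat → Int → List Int → List Int × Int
  | _, v, [] => ([], v)
  | i2, v, e :: rest =>
    if i % 2 == 0 then
      if i2 % 2 == 1 then
        let r := patronARow i (i2 + 1) (v + 1) rest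
        (v :: r.1, r.2)
      else
        let r := patronARow i (i2 + 1) v rest
        (e :: r.1, r.2)
    else
      if i2 % 2 == 0 then
        let r := patronARow i (i2 + 1) (v + 1) rest
        (v :: r.1, r.2)
      else
        let r := patronARow i (i2 + 1) v rest
        (e :: r.1, r.2)

-- outer loop of A over rows, threading the counter
def patronARows : Nat → Int → List (List Int) → List (List Int)
  | _, _, [] => []
  | i, v, fila :: rest =>
    let r := patronARow i 0 v fila
    r.1 :: patronARows (i + 1) r.2 rest

def patron_e (matriz : List (List Int)) : List (List Int) :=
  patronARows 0 1 matriz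

-- ===== PORT B =====
-- B's outer loop: prefix = active cells in all previous rows; each cell computed in closed form
def patronBRows : Nat → Int → List (List Int) → List (List Int)
  | _, _, [] => []
  | i, pre, fila :: rest =>
    (fila.mapIdx (fun i2 e =>
      if (i + i2) % 2 == 1 then pre + ((i2 + i % 2) / 2 : Nat) + 1 else e))
      :: patronBRows (i + 1) (pre + ((fila.length + i % 2) / 2 : Nat)) rest

def patron_e_alt (matriz : List (List Int)) : List (List Int) :=
  patronBRows 0 0 matriz

-- ===== PRECONDITION & SPEC =====
def Spec_patron_e (matriz : List (List Int)) (out : List (List Int)) : Prop := out = patron_e_alt matriz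
instance (matriz : List (List Int)) (out : List (List Int)) : Decidable (Spec_patron_e matriz out) := by unfold Spec_patron_e; infer_instance

-- ===== CLAIM (what is proved, stated in full; the proofs are below) =====
def Claim_equal_patron_e : Prop := ∀ (matriz : List (List Int)), Dom_patron_e matriz → Spec_patron_e matriz (patron_e matriz)

-- ===== LEMMAS AND PROOFS =====

-- pointwise-equal index functions give equal mapIdx results
theorem pv_mapIdx_congr {α β : Type} (f g : Nat → α → β) (h : ∀ i a, f i a = g i a) (l : List α) :
    l.mapIdx f = l.mapIdx g := by
  have hfg : f = g := funext fun i => funext fun a => h i a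
  rw [hfg]

-- A's nested parity branches fire exactly when (i + i2) is odd
theorem patronARow_cons (i i2 : Nat) (v e : Int) (rest : List Int) :
    patronARow i i2 v (e :: rest) =
      if (i + i2) % 2 = 1 then
        (v :: (patronARow i (i2 + 1) (v + 1) rest).1, (patronARow i (i2 + 1) (v + 1) rest).2)
      else
        (e :: (patronARow i (i2 + 1) v rest).1, (patronARow i (i2 + 1) v rest).2) := by
  simp only [patronARow, beq_iff_eq]
  split_ifs <;> first | rfl | omega

-- closed form for A's inner row walk: resulting row and final counter
theorem patronARow_eq (i : Nat) (fila : List Int) : ∀ (i2 : Nat) (v : Int),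
    patronARow i i2 v fila =
      (fila.mapIdx (fun j e =>
        if (i + i2 + j) % 2 = 1 then v + ((j + (i + i2) % 2) / 2 : Nat) else e),
       v + ((fila.length + (i + i2) % 2) / 2 : Nat)) := by
  induction fila with
  | nil => intro i2 v; simp [patronARow]
  | cons e rest ih =>
    intro i2 v
    rw [patronARow_cons, List.mapIdx_cons]
    by_cases h : (i + i2) % 2 = 1
    · have hm' : (i + (i2 + 1)) % 2 = 0 := by omega
      rw [if_pos h, ih (i2 + 1) (v + 1)]
      refine Prod.ext ?_ ?_
      · simp only
        congr 1
        · rw [if_pos (by omega : (i + i2 + 0) % 2 = 1)]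
          have : (0 + (i + i2) % 2) / 2 = 0 := by omega
          rw [this]; simp
        · apply pv_mapIdx_congr
          intro j a
          have hc : (i + (i2 + 1) + j) % 2 = (i + i2 + (j + 1)) % 2 := by omega
          rw [hc, hm']
          have hd : (j + 0) / 2 + 1 = (j + 1 + (i + i2) % 2) / 2 := by omega
          split
          · rw [← hd]; push_cast; ring
          · rfl
      · simp only [hm', List.length_cons]
        omega
    · have hm : (i + i2) % 2 = 0 := by omega
      have hm' : (i + (i2 + 1)) % 2 = 1 := by omega
      rw [if_neg h, ih (i2 + 1) v]
      refine Prod.ext ?_ ?_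
      · simp only
        congr 1
        · rw [if_neg (by omega : ¬ (i + i2 + 0) % 2 = 1)]
        · apply pv_mapIdx_congr
          intro j a
          have hc : (i + (i2 + 1) + j) % 2 = (i + i2 + (j + 1)) % 2 := by omega
          rw [hc, hm', hm]
      · simp only [hm', hm, List.length_cons]

-- A's row traversal equals B's with prefix = counter - 1
theorem patronRows_eq (matriz : List (List Int)) : ∀ (i : Nat) (v : Int),
    patronARows i v matriz = patronBRows i (v - 1) matriz := by
  induction matriz with
  | nil => intro i v; simp [patronARows, patronBRows]
  | cons fila rest ih =>
    intro i v
    simp only [patronARows, patronBRows]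
    rw [patronARow_eq i fila 0 v]
    congr 1
    · apply pv_mapIdx_congr
      intro j a
      have hc : (i + 0 + j) % 2 = (i + j) % 2 := by omega
      have hc2 : (j + (i + 0) % 2) / 2 = (j + i % 2) / 2 := by omega
      simp only [beq_iff_eq]
      rw [hc, hc2]
      split
      · omega
      · rfl
    · rw [ih (i + 1)]
      congr 1
      have : (fila.length + (i + 0) % 2) / 2 = (fila.length + i % 2) / 2 := by omega
      omega

-- ===== VERDICT (by name: the statement is the Claim_ definition above) =====
theorem patron_e_spec : Claim_equal_patron_e := by
  intro matriz _
  show patron_e matriz = patron_e_alt matriz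
  unfold patron_e patron_e_alt
  rw [patronRows_eq]
  norm_num
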